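-- pv_equiv track=rewrite | github.com/KijinKims/ASA_SS2020 | Burrows-Wheeler Transform/BWT.py | LF
-- ===== SOURCE A (Python) =====
-- def carray(bwt):
--     '''
--     return C-array of bwt
--     '''
--     cnt_dict = {}
--
--     # calculate the frequency of characters
--     for char in bwt:
--         if not char in cnt_dict:
--             cnt_dict[char] = 1
--         else:
--             cnt_dict[char] += 1
--
--     ret_dict = {}
--     cum = 0
--
--     # calculate cumulative of frequency
--     for key in sorted(cnt_dict.keys()):
--         ret_dict[key] = cum
--         cum += cnt_dict[key]
--
--     return ret_dict
--
-- def LF(bwt):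
--     '''
--     return LF array of T
--     '''
--
--     carr = carray(bwt)
--     cnt_dict = {} # count occurrence of each element
--     for key in carr.keys():
--         cnt_dict[key] = 0
--
--     ret_lf = []
--     for i in range(len(bwt)):
--         char = bwt[i]
--         # calculate lf using carray and curent counter of each character
--         ret_lf.append(carr[char] + cnt_dict[char])
--         cnt_dict[char] += 1
--
--     return ret_lf
-- ===== SOURCE B (Python) =====
-- def LF(bwt):
--     # LF[i] is the position index i lands at when the BWT positions are
--     # sorted by their character (ties broken by position, as a stable sort does).
--     order = sorted(range(len(bwt)), key=lambda i: (bwt[i], i))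
--     ret = [0] * len(bwt)
--     for rank, i in enumerate(order):
--         ret[i] = rank
--     return ret
-- ===== Notes on version B (the rewrite author's own statement) =====
-- stated objective: alternative
-- what changed: Replaces A's C-array helper and the two running-counter dicts by a stable argsort: sort the positions by (character, position) and invert the resulting permutation, since LF[i] is exactly the sorted rank of position i.
import Mathlib
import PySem

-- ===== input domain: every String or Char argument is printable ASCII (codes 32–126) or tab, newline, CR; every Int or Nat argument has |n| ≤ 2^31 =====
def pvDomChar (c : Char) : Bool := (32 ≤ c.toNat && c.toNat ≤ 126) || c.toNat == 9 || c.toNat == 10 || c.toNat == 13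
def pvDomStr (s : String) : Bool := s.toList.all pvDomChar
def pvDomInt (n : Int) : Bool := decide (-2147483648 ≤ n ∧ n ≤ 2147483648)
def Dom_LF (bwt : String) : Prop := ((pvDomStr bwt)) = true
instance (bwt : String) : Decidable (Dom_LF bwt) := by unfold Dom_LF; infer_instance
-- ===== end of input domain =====

-- B replaces A's C-array + running-counter dicts by a stable argsort of the BWT
-- positions and inverts that permutation (LF[i] = sort rank of i); alternative, not faster.

-- ===== PORT A =====
-- helper carray(bwt): frequency dict, then cumulative sums over sorted keys
def pvCarray (cs : List Char) : PySem.Dict Char Int :=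
  let cnt_dict := cs.foldl
    (fun d char =>
      if PySem.Dict.contains d char = false
      then PySem.Dict.insert d char 1
      else PySem.Dict.insert d char (PySem.Dict.getD d char 0 + 1))
    PySem.Dict.empty
  -- `cnt_dict[key]` with key drawn from cnt_dict's own keys never raises: `getD _ 0` is exact here
  let st := (PySem.List.sorted (PySem.Dict.keys cnt_dict) (fun k => k) false).foldl
    (fun (st : PySem.Dict Char Int × Int) key =>
      (PySem.Dict.insert st.1 key st.2, st.2 + PySem.Dict.getD cnt_dict key 0))
    (PySem.Dict.empty, 0)
  st.1

def LF (bwt : String) : List Int :=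
  let carr := pvCarray bwt.toList
  let cnt_dict := (PySem.Dict.keys carr).foldl
    (fun d key => PySem.Dict.insert d key (0 : Int)) PySem.Dict.empty
  -- `bwt[i]` with i ∈ range(len(bwt)) is always in range, and `carr[char]` has char ∈ bwt
  -- a key of carr: both lookups never raise, so pyGetD / getD are exact here
  let st := (PySem.List.pyRange 0 (PySem.List.len bwt.toList) 1).foldl
    (fun (st : List Int × PySem.Dict Char Int) i =>
      let char := PySem.List.pyGetD bwt.toList i ' '
      (st.1 ++ [PySem.Dict.getD carr char 0 + PySem.Dict.getD st.2 char 0],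
       PySem.Dict.insert st.2 char (PySem.Dict.getD st.2 char 0 + 1)))
    ([], cnt_dict)
  st.1

-- ===== PORT B =====
def LF_alt (bwt : String) : List Int :=
  -- sorted(range(len(bwt)), key=lambda i: (bwt[i], i)); bwt[i] with i from range never raises
  let order := PySem.List.sorted2 (PySem.List.pyRange 0 (PySem.List.len bwt.toList) 1)
      (fun i => PySem.List.pyGetD bwt.toList i ' ') (fun i => i) false
  -- [0] * len(bwt)
  let ret0 : List Int := List.replicate bwt.toList.length (0 : Int)
  -- ret[i] = rank with i ∈ range(len(bwt)): always in range, pySetD is exact here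
  (PySem.List.enumerate order 0).foldl (fun ret p => PySem.List.pySetD ret p.2 p.1) ret0


-- ===== PRECONDITION & SPEC =====
def Spec_LF (bwt : String) (out : List Int) : Prop := out = LF_alt bwt
instance (bwt : String) (out : List Int) : Decidable (Spec_LF bwt out) := by unfold Spec_LF; infer_instance

-- ===== CLAIM (what is proved, stated in full; the proofs are below) =====
def Claim_equal_LF : Prop := ∀ (bwt : String), Dom_LF bwt → Spec_LF bwt (LF bwt)

-- ===== LEMMAS AND PROOFS =====

-- the common closed form: LF value at position i
def lfVal (cs : List Char) (i : Nat) : Int :=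
  (List.countP (fun x => decide (x < cs.getD i ' ')) cs : Int)
  + (List.count (cs.getD i ' ') (cs.take i) : Int)

-- A's frequency loop is Counter(bwt)
theorem cnt_eq_counter (cs : List Char) :
    cs.foldl
      (fun d char =>
        if PySem.Dict.contains d char = false
        then PySem.Dict.insert d char 1
        else PySem.Dict.insert d char (PySem.Dict.getD d char 0 + 1))
      PySem.Dict.empty = PySem.Dict.counter cs := by
  rw [← PySem.Dict.foldl_insert_getD_add_one_eq_counter]
  congr 1
  funext d char
  by_cases h : PySem.Dict.contains d char = false
  · rw [PySem.Dict.getD_of_not_contains (d := d) (k := char) (d0 := 0) h]; simp [h]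
  · simp [h]

-- invariant of carray's cumulative loop over strictly increasing keys
theorem carrFoldInv (cnt : PySem.Dict Char Int) :
    ∀ (ks : List Char), ks.Pairwise (· < ·) → ∀ (d : PySem.Dict Char Int) (cum : Int) (c : Char),
      PySem.Dict.getD
        ((ks.foldl
          (fun (st : PySem.Dict Char Int × Int) key =>
            (PySem.Dict.insert st.1 key st.2, st.2 + PySem.Dict.getD cnt key 0))
          (d, cum)).1) c 0
      = if c ∈ ks then
          cum + ((ks.filter (fun k => decide (k < c))).map (fun k => PySem.Dict.getD cnt k 0)).sum
        else PySem.Dict.getD d c 0 := by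
  intro ks
  induction ks with
  | nil => intro _ d cum c; simp
  | cons k t ih =>
      intro hp d cum c
      rcases List.pairwise_cons.mp hp with ⟨hk, ht⟩
      simp only [List.foldl_cons]
      rw [ih ht (PySem.Dict.insert d k cum) (cum + PySem.Dict.getD cnt k 0) c]
      by_cases hct : c ∈ t
      · have hkc : k < c := hk c hct
        simp only [List.mem_cons, hct, or_true, List.filter_cons,
          decide_eq_true_eq, hkc, if_pos, List.map_cons, List.sum_cons]
        ring
      · by_cases hck : c = k
        · subst hck
          have hfil : t.filter (fun x => decide (x < c)) = [] := by
            rw [List.filter_eq_nil_iff]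
            intro x hx
            simp only [decide_eq_true_eq]
            exact lt_asymm (hk x hx)
          simp [hct, hfil, PySem.Dict.getD_insert_self]
        · have hmem : ¬ c ∈ k :: t := by simp [hck, hct]
          simp only [hct, if_false, hmem]
          exact PySem.Dict.getD_insert_of_ne d cum 0 hck

theorem sum_filter_count (cs : List Char) (c : Char) (ks : List Char)
    (hperm : ks.Perm cs.dedup) :
    ((ks.filter (fun k => decide (k < c))).map (fun k => ((List.count k cs : Nat) : Int))).sum
      = (cs.countP (fun x => decide (x < c)) : Int) := by
  have hp2 := (hperm.filter (fun k => decide (k < c))).map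
      (fun k => ((List.count k cs : Nat) : Int))
  rw [hp2.sum_eq, ← List.sum_map_count_dedup_filter_eq_countP (fun x => decide (x < c)) cs]
  simp [Nat.cast_list_sum, List.map_map, Function.comp_def]

-- the characterisation of carray: C[c] = #{x ∈ bwt | x < c}
theorem carr_spec (cs : List Char) (c : Char) (hc : c ∈ cs) :
    PySem.Dict.getD (pvCarray cs) c 0 = (cs.countP (fun x => decide (x < c)) : Int) := by
  unfold pvCarray
  simp only [cnt_eq_counter, PySem.Dict.keys_counter]
  have hpair := PySem.List.sorted_ofList_pairwise_lt (xs := cs)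
  rw [carrFoldInv (PySem.Dict.counter cs) _ hpair PySem.Dict.empty 0 c]
  have hcm : c ∈ PySem.List.sorted (PySem.Set.ofList cs) (fun x => x) false := by
    rw [PySem.List.mem_sorted]
    exact (PySem.Set.mem_ofList cs c).mpr hc
  rw [if_pos hcm, zero_add]
  have hperm : (PySem.List.sorted (PySem.Set.ofList cs) (fun x => x) false).Perm cs.dedup := by
    refine (PySem.List.sorted_perm _ _ _).trans ?_
    rw [List.perm_ext_iff_of_nodup (PySem.Set.nodup_ofList cs) cs.nodup_dedup]
    intro a
    rw [PySem.Set.mem_ofList, List.mem_dedup]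
  have := sum_filter_count cs c _ hperm
  rw [← this]
  congr 1
  apply List.map_congr_left
  intro k _
  exact PySem.Dict.getD_counter cs k

-- a dict initialised with zeros looks up to 0 everywhere (0 is also getD's default)
theorem zeroInit (ks : List Char) :
    ∀ (d : PySem.Dict Char Int), (∀ c, PySem.Dict.getD d c 0 = 0) →
      ∀ c, PySem.Dict.getD (ks.foldl (fun d key => PySem.Dict.insert d key (0 : Int)) d) c 0 = 0 := by
  induction ks with
  | nil => intro d hd c; simpa using hd c
  | cons k t ih =>
      intro d hd c
      simp only [List.foldl_cons]
      exact ih _ (fun c' => by rw [PySem.Dict.getD_insert]; split <;> simp [hd]) c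

-- invariant of A's main loop
theorem loopInv (cs : List Char) (carr : PySem.Dict Char Int)
    (hcarr : ∀ c ∈ cs, PySem.Dict.getD carr c 0 = (cs.countP (fun x => decide (x < c)) : Int))
    (d0 : PySem.Dict Char Int) (hd0 : ∀ c, PySem.Dict.getD d0 c 0 = 0) :
    ∀ n, n ≤ cs.length →
      ((List.range n).foldl
        (fun (st : List Int × PySem.Dict Char Int) (j : Nat) =>
          (st.1 ++ [PySem.Dict.getD carr (PySem.List.pyGetD cs (j : Int) ' ') 0
                    + PySem.Dict.getD st.2 (PySem.List.pyGetD cs (j : Int) ' ') 0],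
           PySem.Dict.insert st.2 (PySem.List.pyGetD cs (j : Int) ' ')
             (PySem.Dict.getD st.2 (PySem.List.pyGetD cs (j : Int) ' ') 0 + 1)))
        ([], d0)).1 = (List.range n).map (lfVal cs)
      ∧ ∀ c, PySem.Dict.getD
          ((List.range n).foldl
            (fun (st : List Int × PySem.Dict Char Int) (j : Nat) =>
              (st.1 ++ [PySem.Dict.getD carr (PySem.List.pyGetD cs (j : Int) ' ') 0
                        + PySem.Dict.getD st.2 (PySem.List.pyGetD cs (j : Int) ' ') 0],
               PySem.Dict.insert st.2 (PySem.List.pyGetD cs (j : Int) ' ')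
                 (PySem.Dict.getD st.2 (PySem.List.pyGetD cs (j : Int) ' ') 0 + 1)))
            ([], d0)).2 c 0 = ((cs.take n).count c : Int) := by
  intro n
  induction n with
  | zero =>
      intro _
      refine ⟨by simp, fun c => by simpa using hd0 c⟩
  | succ n ih =>
      intro hn1
      have hlt : n < cs.length := hn1
      obtain ⟨ih1, ih2⟩ := ih (Nat.le_of_lt hlt)
      have hget : PySem.List.pyGetD cs ((n : Nat) : Int) ' ' = cs.getD n ' ' := by
        simp
      have hch : cs.getD n ' ' ∈ cs := by
        rw [List.getD_eq_getElem cs ' ' hlt]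
        exact List.getElem_mem hlt
      rw [List.range_succ]
      simp only [List.foldl_append, List.foldl_cons, List.foldl_nil, List.map_append,
        List.map_cons, List.map_nil]
      constructor
      · rw [ih1, hget, hcarr _ hch, ih2]
        simp [lfVal]
      · intro c
        rw [hget, PySem.Dict.getD_insert, ih2, ih2]
        have htake : cs.take (n + 1) = cs.take n ++ [cs.getD n ' '] := by
          rw [List.take_add_one, List.getElem?_eq_getElem hlt, List.getD_eq_getElem cs ' ' hlt]
          rfl
        rw [htake, List.count_append, List.count_singleton]
        simp only [List.getD_eq_getElem?_getD, beq_iff_eq, Nat.cast_add, Nat.cast_ite,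
          Nat.cast_one, Nat.cast_zero]
        by_cases h : c = cs[n]?.getD ' '
        · rw [if_pos h, h, if_pos rfl]
        · rw [if_neg h, if_neg (Ne.symm h), add_zero]

theorem LF_eq_closed (bwt : String) :
    LF bwt = (List.range bwt.toList.length).map (lfVal bwt.toList) := by
  unfold LF
  simp only [PySem.List.len_eq, PySem.List.pyRange_zero_nat, List.foldl_map]
  exact (loopInv bwt.toList (pvCarray bwt.toList)
      (fun c hc => carr_spec bwt.toList c hc)
      _ (zeroInit _ PySem.Dict.empty (fun c => PySem.Dict.getD_empty c 0))
      bwt.toList.length le_rfl).1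


-- the comparison sorted2 uses for B's key (bwt[i], i)
def pvB (cs : List Char) (a b : Int) : Bool :=
  decide (PySem.List.pyGetD cs a ' ' < PySem.List.pyGetD cs b ' ') ||
  (!decide (PySem.List.pyGetD cs b ' ' < PySem.List.pyGetD cs a ' ') && decide (a < b))

theorem sorted2_eq_foldl (cs : List Char) (xs : List Int) :
    PySem.List.sorted2 xs (fun i => PySem.List.pyGetD cs i ' ') (fun i => i) false
      = xs.foldl (fun acc x => PySem.List.insertBy (pvB cs) x acc) [] := rfl

theorem pvB_iff (cs : List Char) (a b : Int) : pvB cs a b = true ↔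
    (PySem.List.pyGetD cs a ' ' < PySem.List.pyGetD cs b ' '
     ∨ (¬ PySem.List.pyGetD cs b ' ' < PySem.List.pyGetD cs a ' ' ∧ a < b)) := by
  simp [pvB]

theorem pvB_asym (cs : List Char) (a b : Int) :
    pvB cs a b = true → pvB cs b a = true → False := by
  rw [pvB_iff, pvB_iff]
  rintro (h1 | ⟨h1, h1'⟩) (h2 | ⟨h2, h2'⟩)
  · exact lt_asymm h1 h2
  · exact h2 h1
  · exact h1 h2
  · omega

theorem pvB_total (cs : List Char) (a b : Int) (h : a ≠ b) :
    pvB cs a b = true ∨ pvB cs b a = true := by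
  rw [pvB_iff, pvB_iff]
  rcases lt_trichotomy (PySem.List.pyGetD cs a ' ') (PySem.List.pyGetD cs b ' ') with h1 | h1 | h1
  · exact Or.inl (Or.inl h1)
  · rcases lt_or_gt_of_ne h with h2 | h2
    · exact Or.inl (Or.inr ⟨by rw [h1]; exact lt_irrefl _, h2⟩)
    · exact Or.inr (Or.inr ⟨by rw [h1]; exact lt_irrefl _, h2⟩)
  · exact Or.inr (Or.inl h1)

theorem pvB_trans (cs : List Char) (a b c : Int) :
    pvB cs a b = true → pvB cs b c = true → pvB cs a c = true := by
  rw [pvB_iff, pvB_iff, pvB_iff]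
  rintro (h1 | ⟨h1, h1'⟩) (h2 | ⟨h2, h2'⟩)
  · exact Or.inl (lt_trans h1 h2)
  · exact Or.inl (lt_of_lt_of_le h1 (not_lt.mp h2))
  · exact Or.inl (lt_of_le_of_lt (not_lt.mp h1) h2)
  · exact Or.inr ⟨fun hca => h2 (lt_of_lt_of_le hca (not_lt.mp h1)), lt_trans h1' h2'⟩

-- insertBy's two equations
theorem insertBy_nil (before : Int → Int → Bool) (x : Int) :
    PySem.List.insertBy before x [] = [x] := rfl

theorem insertBy_cons (before : Int → Int → Bool) (x y : Int) (ys : List Int) :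
    PySem.List.insertBy before x (y :: ys)
      = if before x y = true then x :: y :: ys else y :: PySem.List.insertBy before x ys := rfl

theorem insertBy_perm (before : Int → Int → Bool) (x : Int) :
    ∀ ys, (PySem.List.insertBy before x ys).Perm (x :: ys) := by
  intro ys
  induction ys with
  | nil => simp [insertBy_nil]
  | cons y t ih =>
      rw [insertBy_cons]
      split
      · exact List.Perm.refl _
      · exact (ih.cons y).trans (List.Perm.swap x y t)

theorem insertBy_pairwise (cs : List Char) (x : Int) :
    ∀ (acc : List Int), (∀ y ∈ acc, y ≠ x → pvB cs x y = true ∨ pvB cs y x = true) →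
      x ∉ acc → acc.Pairwise (fun a b => pvB cs a b = true) →
      (PySem.List.insertBy (pvB cs) x acc).Pairwise (fun a b => pvB cs a b = true) := by
  intro acc
  induction acc with
  | nil => intro _ _ _; simp [insertBy_nil]
  | cons y t ih =>
      intro htot hx hs
      rcases List.pairwise_cons.mp hs with ⟨hy, ht⟩
      rw [insertBy_cons]
      split
      · rename_i hxy
        refine List.pairwise_cons.mpr ⟨?_, hs⟩
        intro z hz
        rcases List.mem_cons.mp hz with rfl | hz
        · exact hxy
        · exact pvB_trans cs x y z hxy (hy z hz)
      · rename_i hxy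
        have hyx : pvB cs y x = true := by
          rcases htot y (List.mem_cons_self) (fun h => hx (h ▸ List.mem_cons_self)) with h | h
          · exact absurd h hxy
          · exact h
        refine List.pairwise_cons.mpr ⟨?_, ?_⟩
        · intro z hz
          rcases List.mem_cons.mp (((insertBy_perm (pvB cs) x t).mem_iff).mp hz) with rfl | hz
          · exact hyx
          · exact hy z hz
        · exact ih (fun z hz hzx => htot z (List.mem_cons_of_mem _ hz) hzx)
            (fun h => hx (List.mem_cons_of_mem _ h)) ht

theorem foldl_insertBy_pairwise (cs : List Char) :
    ∀ (xs acc : List Int), (∀ y ∈ acc, y ∉ xs) → acc.Nodup → xs.Nodup →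
      acc.Pairwise (fun a b => pvB cs a b = true) →
      (xs.foldl (fun acc x => PySem.List.insertBy (pvB cs) x acc) acc).Pairwise
        (fun a b => pvB cs a b = true) := by
  intro xs
  induction xs with
  | nil => intro acc _ _ _ hs; exact hs
  | cons x t ih =>
      intro acc hdisj hand hxnd hs
      rcases List.nodup_cons.mp hxnd with ⟨hxt, htnd⟩
      have hxacc : x ∉ acc := fun h => (hdisj x h) List.mem_cons_self
      simp only [List.foldl_cons]
      refine ih _ ?_ ?_ htnd ?_
      · intro y hy
        rcases List.mem_cons.mp (((insertBy_perm (pvB cs) x acc).mem_iff).mp hy) with rfl | hy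
        · exact hxt
        · exact fun h => (hdisj y hy) (List.mem_cons_of_mem _ h)
      · exact ((insertBy_perm (pvB cs) x acc).nodup_iff).mpr (List.nodup_cons.mpr ⟨hxacc, hand⟩)
      · exact insertBy_pairwise cs x acc (fun y _ hyx => (pvB_total cs x y (Ne.symm hyx)))
          hxacc hs

theorem idxOf_eq_countP (cs : List Char) :
    ∀ (l : List Int), l.Pairwise (fun a b => pvB cs a b = true) → l.Nodup →
      ∀ m ∈ l, l.idxOf m = l.countP (fun j => pvB cs j m) := by
  intro l
  induction l with
  | nil => intro _ _ m hm; simp at hm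
  | cons a t ih =>
      intro hp hnd m hm
      rcases List.pairwise_cons.mp hp with ⟨ha, ht⟩
      rcases List.nodup_cons.mp hnd with ⟨hat, htnd⟩
      rcases List.mem_cons.mp hm with rfl | hmt
      · have h0 : pvB cs m m = false := by
          by_contra h
          exact pvB_asym cs m m (by simpa using h) (by simpa using h)
        have h1 : t.countP (fun j => pvB cs j m) = 0 := by
          rw [List.countP_eq_zero]
          intro j hj
          by_contra h
          exact pvB_asym cs m j (ha j hj) (by simpa using h)
        simp [List.idxOf_cons_self, h0, h1]
      · have hne : a ≠ m := fun h => hat (h ▸ hmt)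
        rw [List.idxOf_cons_ne _ hne, List.countP_cons, ih ht htnd m hmt]
        simp [ha m hmt]

-- writing ranks back: ret[i] := rank for (rank, i) in enumerate(order)
theorem setter (n : Nat) :
    ∀ (ord : List Int) (s : Int) (acc : List Int), acc.length = n → ord.Nodup →
      (∀ i ∈ ord, 0 ≤ i ∧ i < (n : Int)) →
      ((PySem.List.enumerate ord s).foldl (fun ret p => PySem.List.pySetD ret p.2 p.1) acc).length = n ∧
      ∀ (m : Nat), m < n →
        PySem.List.pyGetD
          ((PySem.List.enumerate ord s).foldl (fun ret p => PySem.List.pySetD ret p.2 p.1) acc)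
          (m : Int) 0
        = if (m : Int) ∈ ord then s + (ord.idxOf (m : Int) : Int)
          else PySem.List.pyGetD acc (m : Int) 0 := by
  intro ord
  induction ord with
  | nil => intro s acc hlen _ _; exact ⟨by simpa [PySem.List.enumerate_nil] using hlen,
      fun m _ => by simp [PySem.List.enumerate_nil]⟩
  | cons i t ih =>
      intro s acc hlen hnd hbd
      rcases List.nodup_cons.mp hnd with ⟨hit, htnd⟩
      obtain ⟨hi0, hin⟩ := hbd i List.mem_cons_self
      obtain ⟨k, hk, rfl⟩ : ∃ k : Nat, k < n ∧ i = (k : Nat) := by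
        refine ⟨i.toNat, by omega, by omega⟩
      rw [PySem.List.enumerate_cons, List.foldl_cons]
      have hset : PySem.List.pySetD acc ((k : Nat) : Int) s = acc.set k s :=
        PySem.List.pySetD_natCast acc k s
      have hlen' : (acc.set k s).length = n := by simp [hlen]
      obtain ⟨ihlen, ihval⟩ := ih (s + 1) (acc.set k s) hlen' htnd
        (fun j hj => hbd j (List.mem_cons_of_mem _ hj))
      refine ⟨by rw [hset]; exact ihlen, ?_⟩
      intro m hm
      rw [hset, ihval m hm]
      by_cases hmi : (m : Int) = (k : Int)
      · have hmk : m = k := by omega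
        subst hmk
        have hmt : ((m : Nat) : Int) ∉ t := hit
        rw [if_neg hmt, if_pos (List.mem_cons_self), List.idxOf_cons_self]
        rw [PySem.List.pyGetD_natCast]
        simp [List.getD_eq_getElem?_getD, hlen, hm]
      · by_cases hmt : (m : Int) ∈ t
        · rw [if_pos hmt, if_pos (List.mem_cons_of_mem _ hmt),
            List.idxOf_cons_ne _ (fun h => hmi h.symm)]
          push_cast
          ring
        · rw [if_neg hmt, if_neg (by simp [hmt, hmi, List.mem_cons])]
          rw [PySem.List.pyGetD_natCast, PySem.List.pyGetD_natCast]
          simp only [List.getD_eq_getElem?_getD]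
          rw [List.getElem?_set_ne (by omega)]

theorem bool_le (g c : Char) : (decide (g < c) || !decide (c < g)) = decide (g ≤ c) := by
  by_cases h : g ≤ c
  · simp [h, not_lt.mpr h]
  · simp [h, not_le.mp h, not_lt.mpr (le_of_lt (not_le.mp h))]

theorem map_range_getD (cs : List Char) (m : Nat) (hm : m ≤ cs.length) :
    (List.range m).map (fun k => cs.getD k ' ') = cs.take m := by
  apply List.ext_getElem
  · simp [hm]
  · intro k h1 h2
    simp only [List.getElem_map, List.getElem_range, List.getElem_take]
    rw [List.getD_eq_getElem cs ' ' (by simp at h1 h2; omega)]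

theorem countP_le_split (l : List Char) (c : Char) :
    l.countP (fun x => decide (x ≤ c))
      = l.countP (fun x => decide (x < c)) + l.countP (fun x => x == c) := by
  induction l with
  | nil => simp
  | cons a t ih =>
      simp only [List.countP_cons, ih, beq_iff_eq]
      by_cases hlt : a < c <;> by_cases heq : a = c
      · exact absurd heq (ne_of_lt hlt)
      · simp [hlt, heq, le_of_lt hlt]; omega
      · simp [heq]; omega
      · have : ¬ a ≤ c := fun h => (lt_or_eq_of_le h).elim hlt heq
        simp [hlt, heq, this]

theorem countP_pvB (cs : List Char) (m : Nat) (hm : m < cs.length) :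
    (((PySem.List.pyRange 0 (cs.length : Int) 1).countP (fun j => pvB cs j (m : Int))) : Int)
      = lfVal cs m := by
  set c := cs.getD m ' ' with hc
  rw [PySem.List.pyRange_one_append 0 (m : Int) (cs.length : Int) (by omega) (by omega),
    List.countP_append]
  have h1 : (PySem.List.pyRange 0 (m : Int) 1).countP (fun j => pvB cs j (m : Int))
      = (cs.take m).countP (fun x => decide (x < c))
        + (cs.take m).countP (fun x => x == c) := by
    rw [PySem.List.pyRange_zero_nat, List.countP_map]
    rw [List.countP_congr (q := fun k : Nat => decide (cs.getD k ' ' ≤ c)) ?_]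
    · rw [← countP_le_split, ← map_range_getD cs m (le_of_lt hm), List.countP_map]
      rfl
    · intro k hk
      simp only [List.mem_range] at hk
      simp only [Function.comp, pvB, PySem.List.pyGetD_natCast, ← hc]
      rw [show (decide ((k : Int) < (m : Int))) = true by simp [hk]]
      rw [Bool.and_true, bool_le]
  have h2 : (PySem.List.pyRange (m : Int) (cs.length : Int) 1).countP (fun j => pvB cs j (m : Int))
      = (cs.drop m).countP (fun x => decide (x < c)) := by
    rw [List.countP_congr (q := fun j : Int => decide (PySem.List.pyGetD cs j ' ' < c)) ?_]
    · have hmap := PySem.List.map_pyGetD_pyRange' cs ' ' (a := (m : Int)) (by omega)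
      simp only [Int.toNat_natCast] at hmap
      rw [← hmap, List.countP_map]
      rfl
    · intro j hj
      have hjm : (m : Int) ≤ j := ((PySem.List.mem_pyRange_one).mp hj).1
      simp only [pvB, PySem.List.pyGetD_natCast, ← hc]
      rw [show (decide (j < (m : Int))) = false by simp; omega]
      simp
  have hsplit : cs.countP (fun x => decide (x < c))
      = (cs.take m).countP (fun x => decide (x < c))
        + (cs.drop m).countP (fun x => decide (x < c)) := by
    conv_lhs => rw [← List.take_append_drop m cs]
    rw [List.countP_append]
  rw [h1, h2]
  unfold lfVal
  rw [← hc, hsplit, List.count]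
  push_cast
  ring

theorem alt_core (cs : List Char) :
    (PySem.List.enumerate (PySem.List.sorted2 (PySem.List.pyRange 0 (PySem.List.len cs) 1)
        (fun i => PySem.List.pyGetD cs i ' ') (fun i => i) false) 0).foldl
      (fun ret p => PySem.List.pySetD ret p.2 p.1) (List.replicate cs.length (0 : Int))
      = (List.range cs.length).map (lfVal cs) := by
  rw [PySem.List.len_eq]
  have hndr : (PySem.List.pyRange 0 ((cs.length : Int)) 1).Nodup :=
    PySem.List.nodup_pyRange_one 0 (cs.length : Int)
  have hperm := PySem.List.sorted2_perm (PySem.List.pyRange 0 ((cs.length : Int)) 1)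
    (fun i => PySem.List.pyGetD cs i ' ') (fun i => i) false
  have hpair : (PySem.List.sorted2 (PySem.List.pyRange 0 ((cs.length : Int)) 1)
      (fun i => PySem.List.pyGetD cs i ' ') (fun i => i) false).Pairwise
      (fun a b => pvB cs a b = true) := by
    rw [sorted2_eq_foldl]
    exact foldl_insertBy_pairwise cs _ [] (by simp) List.nodup_nil hndr (by simp)
  have hnd := hperm.nodup_iff.mpr hndr
  have hbd : ∀ i ∈ PySem.List.sorted2 (PySem.List.pyRange 0 ((cs.length : Int)) 1)
      (fun i => PySem.List.pyGetD cs i ' ') (fun i => i) false, 0 ≤ i ∧ i < (cs.length : Int) := by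
    intro i hi
    have := (PySem.List.mem_pyRange_one).mp (hperm.mem_iff.mp hi)
    omega
  obtain ⟨hL, hV⟩ := setter cs.length _ 0 (List.replicate cs.length (0 : Int))
    (by simp) hnd hbd
  apply List.ext_getElem (by rw [hL]; simp)
  intro k h1 h2
  have hk : k < cs.length := by simpa using h2
  have hmem : (k : Int) ∈ PySem.List.sorted2 (PySem.List.pyRange 0 ((cs.length : Int)) 1)
      (fun i => PySem.List.pyGetD cs i ' ') (fun i => i) false := by
    rw [hperm.mem_iff, PySem.List.mem_pyRange_one]
    omega
  have hv := hV k hk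
  rw [if_pos hmem, idxOf_eq_countP cs _ hpair hnd _ hmem, hperm.countP_eq] at hv
  rw [countP_pvB cs k hk, zero_add] at hv
  rw [show (List.map (lfVal cs) (List.range cs.length))[k]'h2 = lfVal cs k by simp]
  rw [← hv, PySem.List.pyGetD_natCast]
  exact (List.getD_eq_getElem _ 0 h1).symm

theorem LF_alt_eq_closed (bwt : String) :
    LF_alt bwt = (List.range bwt.toList.length).map (lfVal bwt.toList) :=
  alt_core bwt.toList

-- ===== VERDICT (by name: the statement is the Claim_ definition above) =====
theorem LF_spec : Claim_equal_LF := by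
  intro bwt _
  unfold Spec_LF
  rw [LF_eq_closed, LF_alt_eq_closed]
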